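-- pv_equiv track=rewrite | github.com/JamesWP/aoc2025 | day1/solution.py | part2
-- ===== SOURCE A (Python) =====
-- def process(start, move) -> (int,int):
--     if move < 0:
--         (end, count) = process((100-start)%100, -move)
--         return ((100-end)%100, count)
--
--     assert start>=0 and start <=99
--
--     count = (start+move) // 100
--     end = (start+move)%100
--
--     return (end, count)
--
-- def part2(file):
--     location = 50
--     count = 0
--     for line in file.splitlines():
--         if line[0] == "R":
--             move = int(line[1:])
--         else:
--             move = -int(line[1:])
--         (location, score) = process(location, move)
--         count += score
--     return count
-- ===== SOURCE B (Python) =====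
-- def part2(file):
--     # Stage 1: parse each line into a signed move and build the list of
--     # absolute (unbounded) positions visited, starting from 50.
--     positions = [50]
--     for line in file.splitlines():
--         n = int(line[1:])
--         positions.append(positions[-1] + (n if line[0] == "R" else -n))
--
--     # Stage 2: count multiples of 100 crossed along each segment of the walk.
--     def multiples(lo, hi):
--         # number of multiples of 100 in the half-open interval [lo, hi)
--         return (hi - 1) // 100 - (lo - 1) // 100
--
--     total = 0
--     for a, b in zip(positions, positions[1:]):
--         total += multiples(a + 1, b + 1) if a <= b else multiples(b, a)
--     return total
-- ===== Notes on version B (the rewrite author's own statement) =====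
-- stated objective: alternative
-- what changed: B replaces A's single fold with a recursive mirror helper and mod-100 state by a staged computation: it first materialises the list of unbounded absolute positions of the walk, then sums, over consecutive position pairs, the number of multiples of 100 in the appropriate half-open interval via one interval-counting helper.
import Mathlib
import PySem

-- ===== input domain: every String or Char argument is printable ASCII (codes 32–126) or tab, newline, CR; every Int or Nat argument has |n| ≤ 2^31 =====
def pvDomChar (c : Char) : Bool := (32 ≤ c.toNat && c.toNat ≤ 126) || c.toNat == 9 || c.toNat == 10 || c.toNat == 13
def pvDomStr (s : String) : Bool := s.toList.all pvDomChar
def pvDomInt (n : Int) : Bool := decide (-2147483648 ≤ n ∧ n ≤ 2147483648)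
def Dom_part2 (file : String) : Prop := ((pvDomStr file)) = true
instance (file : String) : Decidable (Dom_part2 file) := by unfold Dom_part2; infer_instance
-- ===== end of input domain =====

-- B replaces A's fold with the recursive mirror helper `process` and mod-100 state by
-- a staged computation over the list of unbounded absolute positions of the walk,
-- counting multiples of 100 in a half-open interval per segment (objective: alternative).

-- ===== PORT A =====
-- `process` from Source A; the Python `assert` never fires on the calls `part2` makes
-- (start is always in 0..99 there) and is not modelled.
def process (start move : Int) : Int × Int :=
  if _h : move < 0 then
    let p := process (PySem.Int.mod (100 - start) 100) (-move)
    (PySem.Int.mod (100 - p.1) 100, p.2)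
  else
    (PySem.Int.mod (start + move) 100, PySem.Int.floordiv (start + move) 100)
termination_by (if move < 0 then 1 else 0)
decreasing_by simp_all; omega

def part2 (file : String) : Int :=
  ((PySem.Str.splitlines file).foldl (fun st line =>
      let move :=
        if PySem.Str.pyGet? line 0 = some 'R' then
          (PySem.Int.ofStr? (PySem.Str.slice line (some 1) none)).getD 0
        else
          -((PySem.Int.ofStr? (PySem.Str.slice line (some 1) none)).getD 0)
      let p := process st.1 move
      (p.1, st.2 + p.2)) (50, 0)).2

-- ===== PORT B =====
-- number of multiples of 100 in the half-open interval [lo, hi)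
def multiples (lo hi : Int) : Int :=
  PySem.Int.floordiv (hi - 1) 100 - PySem.Int.floordiv (lo - 1) 100

def part2_alt (file : String) : Int :=
  let positions := (PySem.Str.splitlines file).foldl (fun ps line =>
      let n := (PySem.Int.ofStr? (PySem.Str.slice line (some 1) none)).getD 0
      ps ++ [(PySem.List.pyGet? ps (-1)).getD 0 +
              (if PySem.Str.pyGet? line 0 = some 'R' then n else -n)]) [(50 : Int)]
  (positions.zip (PySem.List.slice positions (some 1) none)).foldl
    (fun total ab =>
      total + (if ab.1 ≤ ab.2 then multiples (ab.1 + 1) (ab.2 + 1) else multiples ab.2 ab.1)) 0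

-- ===== PRECONDITION & SPEC =====
-- Pre_: A raises on any empty line (IndexError on line[0]) and on any line whose tail
-- is not int-parseable (ValueError on int(line[1:])).
def Pre_part2 (file : String) : Prop :=
  ∀ line ∈ PySem.Str.splitlines file,
    (PySem.Str.pyGet? line 0).isSome = true ∧
    (PySem.Int.ofStr? (PySem.Str.slice line (some 1) none)).isSome = true
instance (file : String) : Decidable (Pre_part2 file) := by unfold Pre_part2; infer_instance

def pvWitness_part2 : String := "R60\nL75\nR200"

def Spec_part2 (file : String) (out : Int) : Prop := out = part2_alt file
instance (file : String) (out : Int) : Decidable (Spec_part2 file out) := by unfold Spec_part2; infer_instance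

-- ===== CLAIM (what is proved, stated in full; the proofs are below) =====
def Claim_equal_part2 : Prop := ∀ (file : String), Dom_part2 file → Pre_part2 file → Spec_part2 file (part2 file)

-- ===== LEMMAS AND PROOFS =====

-- the signed move a line encodes
def moveOf (line : String) : Int :=
  if PySem.Str.pyGet? line 0 = some 'R' then
    (PySem.Int.ofStr? (PySem.Str.slice line (some 1) none)).getD 0
  else
    -((PySem.Int.ofStr? (PySem.Str.slice line (some 1) none)).getD 0)

-- the absolute positions visited after each line, starting from a
def posns : Int → List String → List Int
  | _, [] => []
  | a, l :: ls => (a + moveOf l) :: posns (a + moveOf l) ls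

-- crossing count of one segment, as B computes it
def cross (a b : Int) : Int :=
  if a ≤ b then multiples (a + 1) (b + 1) else multiples b a

def segSum : Int → List Int → Int
  | _, [] => 0
  | a, b :: rest => cross a b + segSum b rest

-- one loop step of A in closed form
theorem process_step (loc m : Int) (h0 : 0 ≤ loc) (h1 : loc < 100) :
    process loc m =
      (PySem.Int.mod (loc + m) 100,
        if 0 ≤ m then PySem.Int.floordiv (loc + m) 100
        else PySem.Int.floordiv (-(loc + m)) 100 - PySem.Int.floordiv (-loc) 100) := by
  rw [process]
  by_cases hm : m < 0
  · rw [process]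
    have hm' : ¬ (-m < 0) := by omega
    simp only [hm, hm', dif_pos, dif_neg, not_false_iff]
    simp only [PySem.Int.mod_eq_emod_of_pos (a := (100 - loc)) (by norm_num : (0:Int) < 100)]
    simp only [PySem.Int.mod_eq_emod_of_pos (b := (100:Int)) (by norm_num : (0:Int) < 100),
      PySem.Int.floordiv_eq_ediv_of_pos (b := (100:Int)) (by norm_num : (0:Int) < 100)]
    have hle : ¬ (0 ≤ m) := by omega
    simp only [hle, if_neg, not_false_iff]
    rw [Prod.mk.injEq]
    constructor <;> omega
  · have hle : (0 ≤ m) := by omega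
    simp only [hm, dif_neg, not_false_iff, hle, if_pos]

-- A's fold, from an arbitrary unbounded position p (its state holds p % 100), totals segSum
theorem foldA_eq_segSum (lines : List String) :
    ∀ (p cnt : Int),
    (lines.foldl (fun st line =>
      let move :=
        if PySem.Str.pyGet? line 0 = some 'R' then
          (PySem.Int.ofStr? (PySem.Str.slice line (some 1) none)).getD 0
        else
          -((PySem.Int.ofStr? (PySem.Str.slice line (some 1) none)).getD 0)
      let p := process st.1 move
      (p.1, st.2 + p.2)) (p % 100, cnt)).2 = cnt + segSum p (posns p lines) := by
  induction lines with
  | nil => intro p cnt; simp [posns, segSum]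
  | cons line rest ih =>
    intro p cnt
    simp only [List.foldl_cons]
    have hstep := process_step (p % 100)
      (if PySem.Str.pyGet? line 0 = some 'R' then
          (PySem.Int.ofStr? (PySem.Str.slice line (some 1) none)).getD 0
        else
          -((PySem.Int.ofStr? (PySem.Str.slice line (some 1) none)).getD 0))
      (Int.emod_nonneg _ (by norm_num)) (Int.emod_lt_of_pos _ (by norm_num))
    rw [hstep]
    set m := (if PySem.Str.pyGet? line 0 = some 'R' then
          (PySem.Int.ofStr? (PySem.Str.slice line (some 1) none)).getD 0
        else
          -((PySem.Int.ofStr? (PySem.Str.slice line (some 1) none)).getD 0)) with hmdef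
    have hm : moveOf line = m := by rw [moveOf, hmdef]
    have hmod : PySem.Int.mod (p % 100 + m) 100 = (p + m) % 100 := by
      rw [PySem.Int.mod_eq_emod_of_pos (by norm_num : (0:Int) < 100)]; omega
    have hcnt : (if 0 ≤ m then PySem.Int.floordiv (p % 100 + m) 100
        else PySem.Int.floordiv (-(p % 100 + m)) 100 - PySem.Int.floordiv (-(p % 100)) 100)
        = cross p (p + m) := by
      rw [cross, multiples, multiples]
      simp only [PySem.Int.floordiv_eq_ediv_of_pos (b := (100:Int)) (by norm_num : (0:Int) < 100)]
      by_cases h : 0 ≤ m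
      · rw [if_pos h, if_pos (by omega : p ≤ p + m)]; omega
      · rw [if_neg h, if_neg (by omega : ¬ p ≤ p + m)]; omega
    rw [hmod, hcnt, ih (p + m) (cnt + cross p (p + m))]
    simp [posns, segSum, hm, add_assoc]

-- B's positions-building fold appends posns
theorem foldB_build (lines : List String) :
    ∀ (ps : List Int) (a : Int), (PySem.List.pyGet? ps (-1)).getD 0 = a →
    (lines.foldl (fun ps line =>
      let n := (PySem.Int.ofStr? (PySem.Str.slice line (some 1) none)).getD 0
      ps ++ [(PySem.List.pyGet? ps (-1)).getD 0 +
              (if PySem.Str.pyGet? line 0 = some 'R' then n else -n)]) ps)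
      = ps ++ posns a lines := by
  induction lines with
  | nil => intro ps a _; simp [posns]
  | cons line rest ih =>
    intro ps a ha
    simp only [List.foldl_cons, posns]
    have hm : (if PySem.Str.pyGet? line 0 = some 'R' then
          (PySem.Int.ofStr? (PySem.Str.slice line (some 1) none)).getD 0
        else -((PySem.Int.ofStr? (PySem.Str.slice line (some 1) none)).getD 0)) = moveOf line := by
      rw [moveOf]
    rw [ha]
    have hlast : (PySem.List.pyGet? (ps ++ [a + (if PySem.Str.pyGet? line 0 = some 'R' then
          (PySem.Int.ofStr? (PySem.Str.slice line (some 1) none)).getD 0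
        else -((PySem.Int.ofStr? (PySem.Str.slice line (some 1) none)).getD 0))]) (-1)).getD 0
        = a + moveOf line := by
      rw [PySem.List.pyGet?_neg_one_append_singleton, hm]; rfl
    rw [ih _ _ hlast, hm]
    simp

-- B's zip fold totals segSum
theorem foldB_sum (ps : List Int) :
    ∀ (a acc : Int),
    (((a :: ps).zip ps).foldl
      (fun total ab =>
        total + (if ab.1 ≤ ab.2 then multiples (ab.1 + 1) (ab.2 + 1) else multiples ab.2 ab.1))
      acc) = acc + segSum a ps := by
  induction ps with
  | nil => intro a acc; simp [segSum]
  | cons b rest ih =>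
    intro a acc
    simp only [List.zip_cons_cons, List.foldl_cons]
    rw [ih b]
    simp [segSum, cross, add_assoc]

-- ===== VERDICT (by name: the statement is the Claim_ definition above) =====
theorem part2_spec : Claim_equal_part2 := by
  intro file _ _
  show part2 file = part2_alt file
  unfold part2 part2_alt
  rw [show ((50 : Int), (0 : Int)) = ((50 : Int) % 100, (0 : Int)) by norm_num]
  rw [foldA_eq_segSum (PySem.Str.splitlines file) 50 0]
  rw [foldB_build (PySem.Str.splitlines file) [(50 : Int)] 50 rfl]
  simp only [List.singleton_append, PySem.List.slice_from_one, List.tail_cons, foldB_sum]
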